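-- pv_equiv track=rewrite | github.com/k-harada/AtCoder | ARC/ARC160/B.py | solve_sub
-- ===== SOURCE A (Python) =====
-- MOD = 998244353
--
-- def solve_sub(c):
--     # x < y < z
--     res_1 = 0
--     for y in range(2, c + 1):
--         if y * y >= c:
--             break
--         res_1 += ((c // y) - y) * (y - 1) % MOD
--     res_1 %= MOD
--     # x < y = z
--     res_2 = 0
--     for y in range(2, c + 1):
--         if y * y > c:
--             break
--         res_2 += y - 1
--     res_2 %= MOD
--     # x = y < z
--     res_3 = 0
--     for y in range(1, c + 1):
--         if y * y >= c:
--             break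
--         res_3 += ((c // y) - y)
--     res_3 %= MOD
--     # x = y = z
--     res_4 = 0
--     for y in range(1, c + 1):
--         if y * y > c:
--             break
--         res_4 += 1
--     return (res_1 * 6 + res_2 * 3 + res_3 * 3 + res_4) % MOD
-- ===== SOURCE B (Python) =====
-- MOD = 998244353
--
-- def solve_sub(c):
--     if c <= 0:
--         return 0
--     res_1 = 0
--     res_3 = 0
--     y = 1
--     while y * y < c:
--         d = c // y - y
--         res_3 += d
--         res_1 += d * (y - 1) % MOD
--         y += 1
--     m = y if y * y == c else y - 1  # m = floor(sqrt(c))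
--     res_2 = (m - 1) * m // 2 % MOD
--     return (res_1 % MOD * 6 + res_2 * 3 + res_3 % MOD * 3 + m) % MOD
-- ===== Notes on version B (the rewrite author's own statement) =====
-- stated objective: simpler
-- what changed: A's four separate bounded loops are replaced by one fused while-loop computing res_1 and res_3 together, with res_2 and res_4 obtained as closed forms (a triangular number and the integer square root) from the loop's final index.
import Mathlib
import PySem

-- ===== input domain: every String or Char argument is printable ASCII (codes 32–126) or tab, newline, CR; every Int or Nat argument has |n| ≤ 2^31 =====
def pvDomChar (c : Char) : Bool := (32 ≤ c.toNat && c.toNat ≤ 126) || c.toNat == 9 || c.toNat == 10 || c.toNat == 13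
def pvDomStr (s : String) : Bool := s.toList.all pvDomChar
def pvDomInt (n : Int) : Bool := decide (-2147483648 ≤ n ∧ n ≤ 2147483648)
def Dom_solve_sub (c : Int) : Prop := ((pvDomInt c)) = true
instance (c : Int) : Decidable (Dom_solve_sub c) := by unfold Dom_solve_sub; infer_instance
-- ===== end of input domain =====

-- B replaces A's four bounded loops by one while-loop (res_1 and res_3 fused) plus closed
-- forms for res_2 and res_4 derived from the loop's final index (objective: simpler).

def MODP : Int := 998244353

-- termination helpers for the while-loops (cited in decreasing_by)
theorem pv_lt_of_sq_lt {y c : Int} (h : y * y < c) : y < c := by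
  rcases le_total y 0 with h0 | h0 <;> nlinarith

-- ===== PORT A =====
-- for y in range(2, c+1): if y*y >= c: break; res_1 += ((c//y)-y)*(y-1) % MOD
def loopA1 (c : Int) (y acc : Int) : Nat → Int
  | 0 => acc
  | f+1 =>
    if y * y ≥ c then acc
    else loopA1 c (y+1) (acc + PySem.Int.mod ((PySem.Int.floordiv c y - y) * (y - 1)) MODP) f

-- for y in range(2, c+1): if y*y > c: break; res_2 += y - 1
def loopA2 (c : Int) (y acc : Int) : Nat → Int
  | 0 => acc
  | f+1 => if y * y > c then acc else loopA2 c (y+1) (acc + (y - 1)) f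

-- for y in range(1, c+1): if y*y >= c: break; res_3 += (c//y) - y
def loopA3 (c : Int) (y acc : Int) : Nat → Int
  | 0 => acc
  | f+1 =>
    if y * y ≥ c then acc
    else loopA3 c (y+1) (acc + (PySem.Int.floordiv c y - y)) f

-- for y in range(1, c+1): if y*y > c: break; res_4 += 1
def loopA4 (c : Int) (y acc : Int) : Nat → Int
  | 0 => acc
  | f+1 => if y * y > c then acc else loopA4 c (y+1) (acc + 1) f

def solve_sub (c : Int) : Int :=
  let res_1 := PySem.Int.mod (loopA1 c 2 0 (c - 1).toNat) MODP
  let res_2 := PySem.Int.mod (loopA2 c 2 0 (c - 1).toNat) MODP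
  let res_3 := PySem.Int.mod (loopA3 c 1 0 c.toNat) MODP
  let res_4 := loopA4 c 1 0 c.toNat
  PySem.Int.mod (res_1 * 6 + res_2 * 3 + res_3 * 3 + res_4) MODP

-- ===== PORT B =====
-- while y*y < c: d = c//y - y; res_3 += d; res_1 += d*(y-1) % MOD; y += 1
-- returns (res_1, res_3, final y)
def loopB (c y r1 r3 : Int) : Int × Int × Int :=
  if h : y * y < c then
    loopB c (y + 1)
      (r1 + PySem.Int.mod ((PySem.Int.floordiv c y - y) * (y - 1)) MODP)
      (r3 + (PySem.Int.floordiv c y - y))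
  else (r1, r3, y)
termination_by (c - y).toNat
decreasing_by have := pv_lt_of_sq_lt h; omega

def solve_sub_alt (c : Int) : Int :=
  if c ≤ 0 then 0
  else
    let t := loopB c 1 0 0
    let m := if t.2.2 * t.2.2 = c then t.2.2 else t.2.2 - 1
    let res_2 := PySem.Int.mod (PySem.Int.floordiv ((m - 1) * m) 2) MODP
    PySem.Int.mod
      (PySem.Int.mod t.1 MODP * 6 + res_2 * 3 + PySem.Int.mod t.2.1 MODP * 3 + m) MODP

-- ===== PRECONDITION & SPEC =====
def Spec_solve_sub (c : Int) (out : Int) : Prop := out = solve_sub_alt c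
instance (c : Int) (out : Int) : Decidable (Spec_solve_sub c out) := by unfold Spec_solve_sub; infer_instance

-- ===== CLAIM (what is proved, stated in full; the proofs are below) =====
def Claim_equal_solve_sub : Prop := ∀ (c : Int), Dom_solve_sub c → Spec_solve_sub c (solve_sub c)

-- ===== LEMMAS AND PROOFS =====

theorem pv_le_of_sq_le {y c : Int} (h : y * y ≤ c) : y ≤ c := by
  rcases le_total y 0 with h0 | h0 <;> nlinarith


-- idealized (fuel-free) versions of the four loop bodies
def stopF (c y : Int) : Int :=
  if h : y * y < c then stopF c (y + 1) else y
termination_by (c - y).toNat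
decreasing_by have := pv_lt_of_sq_lt h; omega

def R1 (c y : Int) : Int :=
  if h : y * y < c then
    PySem.Int.mod ((PySem.Int.floordiv c y - y) * (y - 1)) MODP + R1 c (y + 1)
  else 0
termination_by (c - y).toNat
decreasing_by have := pv_lt_of_sq_lt h; omega

def R3 (c y : Int) : Int :=
  if h : y * y < c then (PySem.Int.floordiv c y - y) + R3 c (y + 1) else 0
termination_by (c - y).toNat
decreasing_by have := pv_lt_of_sq_lt h; omega

def C2 (c y : Int) : Int :=
  if h : y * y ≤ c then (y - 1) + C2 c (y + 1) else 0
termination_by (c + 1 - y).toNat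
decreasing_by have := pv_le_of_sq_le h; omega

def C4 (c y : Int) : Int :=
  if h : y * y ≤ c then 1 + C4 c (y + 1) else 0
termination_by (c + 1 - y).toNat
decreasing_by have := pv_le_of_sq_le h; omega

def Msq (c : Int) : Int :=
  if stopF c 1 * stopF c 1 = c then stopF c 1 else stopF c 1 - 1

-- one-step unfolding equations for the fuel-free loop bodies
theorem modP_zero : PySem.Int.mod 0 MODP = 0 := by
  rw [PySem.Int.mod_eq_emod_of_pos (by decide)]; exact Int.zero_emod _

theorem R1_step (c y : Int) (h : y * y < c) :
    R1 c y = PySem.Int.mod ((PySem.Int.floordiv c y - y) * (y - 1)) MODP + R1 c (y + 1) := by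
  rw [R1, dif_pos h]

theorem R1_stop (c y : Int) (h : ¬ y * y < c) : R1 c y = 0 := by rw [R1, dif_neg h]

theorem R3_step (c y : Int) (h : y * y < c) :
    R3 c y = (PySem.Int.floordiv c y - y) + R3 c (y + 1) := by rw [R3, dif_pos h]

theorem R3_stop (c y : Int) (h : ¬ y * y < c) : R3 c y = 0 := by rw [R3, dif_neg h]

theorem C2_step (c y : Int) (h : y * y ≤ c) : C2 c y = (y - 1) + C2 c (y + 1) := by
  rw [C2, dif_pos h]

theorem C2_stop (c y : Int) (h : ¬ y * y ≤ c) : C2 c y = 0 := by rw [C2, dif_neg h]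

theorem C4_step (c y : Int) (h : y * y ≤ c) : C4 c y = 1 + C4 c (y + 1) := by
  rw [C4, dif_pos h]

theorem C4_stop (c y : Int) (h : ¬ y * y ≤ c) : C4 c y = 0 := by rw [C4, dif_neg h]

theorem stopF_step (c y : Int) (h : y * y < c) : stopF c y = stopF c (y + 1) := by
  rw [stopF, dif_pos h]

theorem stopF_stop (c y : Int) (h : ¬ y * y < c) : stopF c y = y := by rw [stopF, dif_neg h]

-- loopB computes (r1 + R1, r3 + R3, stopF)
theorem loopB_eq (c y r1 r3 : Int) :
    loopB c y r1 r3 = (r1 + R1 c y, r3 + R3 c y, stopF c y) := by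
  fun_induction loopB with
  | case1 y r1 r3 h ih =>
      rw [ih, R1_step c y h, R3_step c y h, stopF_step c y h]
      refine congrArg₂ Prod.mk (by ring) (congrArg₂ Prod.mk (by ring) rfl)
  | case2 y r1 r3 h =>
      rw [R1_stop c y h, R3_stop c y h, stopF_stop c y h]
      refine congrArg₂ Prod.mk (by ring) (congrArg₂ Prod.mk (by ring) rfl)

-- fueled A-loops reach their break before fuel runs out
theorem loopA1_eq (c : Int) (f : Nat) : ∀ y acc : Int, 1 ≤ y → (c + 1 - y).toNat ≤ f →
    loopA1 c y acc f = acc + R1 c y := by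
  induction f with
  | zero =>
      intro y acc hy hf
      have hy' : c + 1 ≤ y := by omega
      have hcy : ¬ y * y < c := by nlinarith
      rw [loopA1, R1_stop c y hcy]; ring
  | succ f ih =>
      intro y acc hy hf
      rw [loopA1]
      by_cases hlt : y * y < c
      · rw [if_neg (not_le.mpr hlt), ih (y + 1) _ (by omega) (by omega), R1_step c y hlt]
        ring
      · rw [if_pos (not_lt.mp hlt), R1_stop c y hlt]; ring

theorem loopA2_eq (c : Int) (f : Nat) : ∀ y acc : Int, 1 ≤ y → (c + 1 - y).toNat ≤ f →
    loopA2 c y acc f = acc + C2 c y := by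
  induction f with
  | zero =>
      intro y acc hy hf
      have hy' : c + 1 ≤ y := by omega
      have hcy : ¬ y * y ≤ c := by nlinarith
      rw [loopA2, C2_stop c y hcy]; ring
  | succ f ih =>
      intro y acc hy hf
      rw [loopA2]
      by_cases hle : y * y ≤ c
      · rw [if_neg (not_lt.mpr hle), ih (y + 1) _ (by omega) (by omega), C2_step c y hle]
        ring
      · rw [if_pos (not_le.mp hle), C2_stop c y hle]; ring

theorem loopA3_eq (c : Int) (f : Nat) : ∀ y acc : Int, 1 ≤ y → (c + 1 - y).toNat ≤ f →
    loopA3 c y acc f = acc + R3 c y := by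
  induction f with
  | zero =>
      intro y acc hy hf
      have hy' : c + 1 ≤ y := by omega
      have hcy : ¬ y * y < c := by nlinarith
      rw [loopA3, R3_stop c y hcy]; ring
  | succ f ih =>
      intro y acc hy hf
      rw [loopA3]
      by_cases hlt : y * y < c
      · rw [if_neg (not_le.mpr hlt), ih (y + 1) _ (by omega) (by omega), R3_step c y hlt]
        ring
      · rw [if_pos (not_lt.mp hlt), R3_stop c y hlt]; ring

theorem loopA4_eq (c : Int) (f : Nat) : ∀ y acc : Int, 1 ≤ y → (c + 1 - y).toNat ≤ f →
    loopA4 c y acc f = acc + C4 c y := by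
  induction f with
  | zero =>
      intro y acc hy hf
      have hy' : c + 1 ≤ y := by omega
      have hcy : ¬ y * y ≤ c := by nlinarith
      rw [loopA4, C4_stop c y hcy]; ring
  | succ f ih =>
      intro y acc hy hf
      rw [loopA4]
      by_cases hle : y * y ≤ c
      · rw [if_neg (not_lt.mpr hle), ih (y + 1) _ (by omega) (by omega), C4_step c y hle]
        ring
      · rw [if_pos (not_le.mp hle), C4_stop c y hle]; ring

theorem stopF_ge (c y : Int) : y ≤ stopF c y := by
  fun_induction stopF with
  | case1 y h ih => omega
  | case2 y h => omega

theorem stopF_sq_ge (c y : Int) : c ≤ stopF c y * stopF c y := by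
  fun_induction stopF with
  | case1 y h ih => exact ih
  | case2 y h => exact not_lt.mp h

theorem stopF_pred (c y : Int) : y < stopF c y → (stopF c y - 1) * (stopF c y - 1) < c := by
  fun_induction stopF with
  | case1 y h ih =>
      intro _
      by_cases h2 : y + 1 < stopF c (y + 1)
      · exact ih h2
      · have he : stopF c (y + 1) = y + 1 := le_antisymm (not_lt.mp h2) (stopF_ge c (y + 1))
        have e : stopF c (y + 1) - 1 = y := by omega
        rw [e]; exact h
  | case2 y h => intro hlt; omega

theorem Msq_bounds (c : Int) (hc : 1 ≤ c) :
    1 ≤ Msq c ∧ Msq c * Msq c ≤ c ∧ c < (Msq c + 1) * (Msq c + 1) := by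
  have hge : 1 ≤ stopF c 1 := stopF_ge c 1
  have hsq : c ≤ stopF c 1 * stopF c 1 := stopF_sq_ge c 1
  unfold Msq
  by_cases hY : stopF c 1 * stopF c 1 = c
  · rw [if_pos hY]
    exact ⟨hge, by omega, by nlinarith⟩
  · rw [if_neg hY]
    have hY2 : c < stopF c 1 * stopF c 1 := lt_of_le_of_ne hsq (Ne.symm hY)
    have h1 : 1 < stopF c 1 := by
      rcases eq_or_lt_of_le hge with e | l
      · exfalso; nlinarith
      · exact l
    have hp := stopF_pred c 1 h1
    refine ⟨by omega, hp.le, by nlinarith⟩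

theorem R1_one_two (c : Int) : R1 c 1 = R1 c 2 := by
  by_cases h : (1 : Int) * 1 < c
  · rw [R1_step c 1 h]
    have e : ((PySem.Int.floordiv c 1 - 1) * (1 - 1) : Int) = 0 := by ring
    rw [e, modP_zero]
    norm_num
  · rw [R1_stop c 1 h, R1_stop c 2 (by nlinarith)]

theorem C4_eval (c : Int) (hc : 1 ≤ c) (y : Int) :
    1 ≤ y → C4 c y = max (Msq c - y + 1) 0 := by
  obtain ⟨hM1, hMle, hMlt⟩ := Msq_bounds c hc
  fun_induction C4 with
  | case1 y h ih =>
      intro hy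
      have hyM : y ≤ Msq c := by by_contra hx; push Not at hx; nlinarith
      rw [ih (by omega)]; omega
  | case2 y h =>
      intro hy
      have : Msq c < y := by by_contra hx; push Not at hx; nlinarith
      omega

theorem C2_eval (c : Int) (hc : 1 ≤ c) (y : Int) :
    1 ≤ y → y ≤ Msq c + 1 →
    2 * C2 c y = Msq c * (Msq c - 1) - (y - 1) * (y - 2) := by
  obtain ⟨hM1, hMle, hMlt⟩ := Msq_bounds c hc
  fun_induction C2 with
  | case1 y h ih =>
      intro hy hyM
      have hyM' : y ≤ Msq c := by by_contra hx; push Not at hx; nlinarith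
      have hrec := ih (by omega) (by omega)
      linarith [hrec]
  | case2 y h =>
      intro hy hyM
      have hlt : Msq c < y := by by_contra hx; push Not at hx; nlinarith
      have e : y = Msq c + 1 := by omega
      rw [e]; ring

-- ===== VERDICT (by name: the statement is the Claim_ definition above) =====
theorem solve_sub_spec : Claim_equal_solve_sub := by
  intro c _
  unfold Spec_solve_sub solve_sub solve_sub_alt
  by_cases hc : c ≤ 0
  · rw [if_pos hc]
    have h1 : (c - 1).toNat = 0 := by omega
    have h2 : c.toNat = 0 := by omega
    rw [h1, h2]
    simp only [loopA1, loopA2, loopA3, loopA4, modP_zero]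
    norm_num [modP_zero]
  · rw [if_neg hc]
    push Not at hc
    have hc1 : 1 ≤ c := hc
    obtain ⟨hM1, hMle, hMlt⟩ := Msq_bounds c hc1
    rw [loopA1_eq c _ 2 0 (by omega) (by omega),
        loopA2_eq c _ 2 0 (by omega) (by omega),
        loopA3_eq c _ 1 0 (by omega) (by omega),
        loopA4_eq c _ 1 0 (by omega) (by omega),
        loopB_eq]
    simp only [zero_add]
    have hm : (if stopF c 1 * stopF c 1 = c then stopF c 1 else stopF c 1 - 1) = Msq c := rfl
    rw [hm, ← R1_one_two]
    have h4 : C4 c 1 = Msq c := by rw [C4_eval c hc1 1 le_rfl]; omega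
    have h2 : PySem.Int.floordiv ((Msq c - 1) * Msq c) 2 = C2 c 2 := by
      have e : (Msq c - 1) * Msq c = 2 * C2 c 2 := by
        have := C2_eval c hc1 2 (by omega) (by omega)
        linarith [this]
      rw [e, PySem.Int.floordiv_eq_ediv_of_pos (by norm_num),
          Int.mul_ediv_cancel_left _ (by norm_num)]
    rw [h4, h2]
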